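-- pv_equiv track=rewrite | github.com/open222333/Python-Code | MyExCode/OtherFileforLearn/linebotnotify_views.py | countO
-- ===== SOURCE A (Python) =====
-- def countO(s): #其他
--     count_a=count_z=count_o=count_s=0
--     for i in s:
--        if (ord(i)>=97 and ord(i)<=122) or (ord(i)>=65 and ord(i)<=90):
--           count_a=count_a+1
--        elif ord(i)>=48 and ord(i)<=57:
--           count_z=count_z+1
--        elif ord(i)==32:
--           count_s=count_s+1
--        else:
--           count_o=count_o+1
--     return  count_o
-- ===== SOURCE B (Python) =====
-- def countO(s):
--     freq = {}
--     for ch in s: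
--         freq[ch] = freq.get(ch, 0) + 1
--     total = 0
--     for ch, n in freq.items():
--         o = ord(ch)
--         if not (97 <= o <= 122 or 65 <= o <= 90 or 48 <= o <= 57 or o == 32):
--             total += n
--     return total
-- ===== Notes on version B (the rewrite author's own statement) =====
-- stated objective: alternative
-- what changed: B builds a character frequency table in one pass and sums the counts of the distinct non-letter/non-digit/non-space keys, instead of A's per-character four-counter loop that maintains three counters B never needs.
import Mathlib
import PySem

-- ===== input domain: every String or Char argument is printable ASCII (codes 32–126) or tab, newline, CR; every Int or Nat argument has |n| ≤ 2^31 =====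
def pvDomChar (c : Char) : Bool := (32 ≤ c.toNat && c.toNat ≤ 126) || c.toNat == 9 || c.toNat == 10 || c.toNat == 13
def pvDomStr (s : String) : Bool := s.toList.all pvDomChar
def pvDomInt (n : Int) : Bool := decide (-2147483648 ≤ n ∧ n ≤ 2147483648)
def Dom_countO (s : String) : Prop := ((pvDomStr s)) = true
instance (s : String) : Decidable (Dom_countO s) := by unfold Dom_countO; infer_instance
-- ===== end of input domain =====

-- B counts "other" characters via a frequency table over distinct characters; same value as A, no speed claim.

-- ===== PORT A =====
-- four running counters, branch order as in the Python
def countO (s : String) : Int :=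
  let st := s.toList.foldl
    (fun (st : Int × Int × Int × Int) i =>
      if (97 ≤ i.toNat ∧ i.toNat ≤ 122) ∨ (65 ≤ i.toNat ∧ i.toNat ≤ 90) then
        (st.1 + 1, st.2.1, st.2.2.1, st.2.2.2)
      else if 48 ≤ i.toNat ∧ i.toNat ≤ 57 then
        (st.1, st.2.1 + 1, st.2.2.1, st.2.2.2)
      else if i.toNat = 32 then
        (st.1, st.2.1, st.2.2.1, st.2.2.2 + 1)
      else
        (st.1, st.2.1, st.2.2.1 + 1, st.2.2.2))
    (0, 0, 0, 0)
  st.2.2.1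

-- ===== PORT B =====
-- frequency dict built with freq[ch] = freq.get(ch, 0) + 1, then a sum over its items
def countO_alt (s : String) : Int :=
  let freq := s.toList.foldl
    (fun (d : PySem.Dict Char Int) ch => d.insert ch (d.getD ch 0 + 1)) PySem.Dict.empty
  freq.items.foldl
    (fun (total : Int) p =>
      if ¬((97 ≤ p.1.toNat ∧ p.1.toNat ≤ 122) ∨ (65 ≤ p.1.toNat ∧ p.1.toNat ≤ 90) ∨
           (48 ≤ p.1.toNat ∧ p.1.toNat ≤ 57) ∨ p.1.toNat = 32) then total + p.2 else total)
    0

-- ===== PRECONDITION & SPEC =====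
def Spec_countO (s : String) (out : Int) : Prop := out = countO_alt s
instance (s : String) (out : Int) : Decidable (Spec_countO s out) := by unfold Spec_countO; infer_instance

-- ===== CLAIM (what is proved, stated in full; the proofs are below) =====
def Claim_equal_countO : Prop := ∀ (s : String), Dom_countO s → Spec_countO s (countO s)

-- ===== LEMMAS AND PROOFS =====

-- the "other"-character predicate both programs test
def pvOther (c : Char) : Bool :=
  !((97 ≤ c.toNat && c.toNat ≤ 122) || (65 ≤ c.toNat && c.toNat ≤ 90) ||
    (48 ≤ c.toNat && c.toNat ≤ 57) || c.toNat == 32)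

lemma countO_fold (l : List Char) :
    ∀ a z o sp : Int,
      (l.foldl
        (fun (st : Int × Int × Int × Int) i =>
          if (97 ≤ i.toNat ∧ i.toNat ≤ 122) ∨ (65 ≤ i.toNat ∧ i.toNat ≤ 90) then
            (st.1 + 1, st.2.1, st.2.2.1, st.2.2.2)
          else if 48 ≤ i.toNat ∧ i.toNat ≤ 57 then
            (st.1, st.2.1 + 1, st.2.2.1, st.2.2.2)
          else if i.toNat = 32 then
            (st.1, st.2.1, st.2.2.1, st.2.2.2 + 1)
          else
            (st.1, st.2.1, st.2.2.1 + 1, st.2.2.2))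
        (a, z, o, sp)).2.2.1 = o + (l.countP pvOther : Int) := by
  induction l with
  | nil => simp
  | cons c t ih =>
    intro a z o sp
    simp only [List.foldl_cons, List.countP_cons]
    by_cases h1 : (97 ≤ c.toNat ∧ c.toNat ≤ 122) ∨ (65 ≤ c.toNat ∧ c.toNat ≤ 90)
    · simp only [if_pos h1, ih]
      have : pvOther c = false := by simp [pvOther]; omega
      simp [this]
    · simp only [if_neg h1]
      by_cases h2 : 48 ≤ c.toNat ∧ c.toNat ≤ 57
      · simp only [if_pos h2, ih]
        have : pvOther c = false := by simp [pvOther]; omega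
        simp [this]
      · simp only [if_neg h2]
        by_cases h3 : c.toNat = 32
        · simp only [if_pos h3, ih]
          have : pvOther c = false := by simp [pvOther]; omega
          simp [this]
        · simp only [if_neg h3, ih]
          have : pvOther c = true := by simp [pvOther]; omega
          simp [this]; ring

lemma sum_fold (L : List (Char × Int)) :
    ∀ t : Int,
      L.foldl
        (fun (total : Int) p =>
          if ¬((97 ≤ p.1.toNat ∧ p.1.toNat ≤ 122) ∨ (65 ≤ p.1.toNat ∧ p.1.toNat ≤ 90) ∨
               (48 ≤ p.1.toNat ∧ p.1.toNat ≤ 57) ∨ p.1.toNat = 32) then total + p.2 else total)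
        t = t + (((L.filter (fun p => pvOther p.1)).map (·.2)).sum) := by
  induction L with
  | nil => simp
  | cons p T ih =>
    intro t
    rw [List.foldl_cons]
    by_cases h : (97 ≤ p.1.toNat ∧ p.1.toNat ≤ 122) ∨ (65 ≤ p.1.toNat ∧ p.1.toNat ≤ 90) ∨
        (48 ≤ p.1.toNat ∧ p.1.toNat ≤ 57) ∨ p.1.toNat = 32
    · have hp : pvOther p.1 = false := by simp [pvOther]; omega
      rw [if_neg (not_not_intro h), ih, List.filter_cons_of_neg (by simp [hp])]
    · have hp : pvOther p.1 = true := by simp [pvOther]; omega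
      rw [if_pos h, ih, List.filter_cons_of_pos (by simp [hp])]
      simp; ring

-- summing counts of the distinct "other" characters counts the "other" occurrences
lemma sum_single (L : List Char) (c : Char) (hnd : L.Nodup) (hc : c ∈ L) :
    ((L.map (fun k => if k = c then (1 : Int) else 0)).sum) = 1 := by
  induction L with
  | nil => simp at hc
  | cons a t ih =>
    by_cases hac : a = c
    · subst hac
      have hnt : a ∉ t := (List.nodup_cons.mp hnd).1
      have hz : ∀ k ∈ t, (if k = a then (1 : Int) else 0) = 0 := by
        intro k hk
        have : k ≠ a := fun he => hnt (he ▸ hk)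
        simp [this]
      simp [List.map_congr_left hz]
    · have hct : c ∈ t := by
        rcases List.mem_cons.mp hc with h | h
        · exact absurd h.symm hac
        · exact h
      simp [hac, ih (List.nodup_cons.mp hnd).2 hct]

-- summing counts of the distinct "other" characters counts the "other" occurrences
lemma sum_counts_eq_countP (l : List Char) (ks : List Char)
    (hnd : ks.Nodup) (hmem : ∀ c ∈ l, c ∈ ks) :
    (((ks.filter (fun k => pvOther k)).map (fun k => (l.count k : Int))).sum)
      = (l.countP pvOther : Int) := by
  induction l with
  | nil => simp
  | cons c t ih =>
    have hmem' : ∀ x ∈ t, x ∈ ks := fun x hx => hmem x (List.mem_cons_of_mem _ hx)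
    have hc : c ∈ ks := hmem c (List.mem_cons_self)
    simp only [List.countP_cons, List.count_cons]
    have hcast : (ks.filter (fun k => pvOther k)).map
          (fun k => ((t.count k + if c == k then 1 else 0 : Nat) : Int))
        = (ks.filter (fun k => pvOther k)).map
          (fun k => (t.count k : Int) + (fun k => if k = c then (1 : Int) else 0) k) := by
      apply List.map_congr_left
      intro k _
      by_cases hkc : k = c
      · simp [hkc]
      · simp [hkc, Ne.symm hkc]
    rw [hcast, List.sum_map_add, ih hmem']
    have hfil : (((ks.filter (fun k => pvOther k)).map (fun k => if k = c then (1 : Int) else 0)).sum)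
        = if pvOther c then 1 else 0 := by
      by_cases hoc : pvOther c
      · have hcmem : c ∈ ks.filter (fun k => pvOther k) := by
          simp [List.mem_filter, hc, hoc]
        rw [sum_single _ _ (hnd.filter _) hcmem]
        simp [hoc]
      · have hocf : pvOther c = false := by simpa using hoc
        have : ∀ k ∈ ks.filter (fun k => pvOther k), (if k = c then (1 : Int) else 0) = 0 := by
          intro k hk
          have hk' : pvOther k = true := by
            have := List.of_mem_filter hk
            simpa using this
          have : k ≠ c := fun he => by rw [he, hocf] at hk'; cases hk'
          simp [this]
        rw [List.map_congr_left this]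
        simp [hocf]
    rw [hfil]
    by_cases hoc : pvOther c <;> simp [hoc]

-- ===== VERDICT (by name: the statement is the Claim_ definition above) =====
theorem countO_spec : Claim_equal_countO := by
  intro s _
  unfold Spec_countO countO countO_alt
  set l := s.toList
  rw [PySem.Dict.foldl_insert_getD_add_one_eq_counter]
  rw [countO_fold, sum_fold, PySem.Dict.items_counter]
  simp only [zero_add]
  rw [List.filter_map, List.map_map]
  exact (sum_counts_eq_countP l (PySem.Set.ofList l) (PySem.Set.nodup_ofList l)
    (fun c hc => (PySem.Set.mem_ofList l c).mpr hc)).symm
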